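-- pv_equiv track=rewrite | github.com/shintarospec/ai-auto-form | backend/services/form_analyzer_lite.py | _detect_split_fields
-- ===== SOURCE A (Python) =====
-- from typing import Dict, List, Optional, Tuple
--
-- def _detect_split_fields(fields: List[Dict]) -> List[Dict]:
--     """連続する短いinputを電話番号/郵便番号分割として検出"""
--     # phone1/2/3, zipcode1/2 は既にname属性パターンで検出済み
--     # ここでは未検出の分割パターンを補完
--     for i in range(len(fields) - 2):
--         f1, f2, f3 = fields[i], fields[i+1], fields[i+2]
--         # 3連続のphone系 → phone1/2/3
--         if (f1.get('field_category') == 'phone' and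
--             f2.get('field_category') == 'phone' and
--             f3.get('field_category') == 'phone'):
--             fields[i]['field_category'] = 'phone1'
--             fields[i+1]['field_category'] = 'phone2'
--             fields[i+2]['field_category'] = 'phone3'
--
--     for i in range(len(fields) - 1):
--         f1, f2 = fields[i], fields[i+1]
--         # 2連続のzipcode系 → zipcode1/2
--         if (f1.get('field_category') == 'zipcode' and
--             f2.get('field_category') == 'zipcode'):
--             fields[i]['field_category'] = 'zipcode1'
--             fields[i+1]['field_category'] = 'zipcode2'
--
--     return fields
-- ===== SOURCE B (Python) =====
-- from itertools import groupby
-- from typing import Dict, List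
--
--
-- def _detect_split_fields(fields: List[Dict]) -> List[Dict]:
--     """Group-first rewrite: split into maximal runs of equal field_category,
--     then rename greedy left-aligned triples (phone) / pairs (zipcode) per run."""
--     for cat, grp in groupby(fields, key=lambda f: f.get('field_category')):
--         run = list(grp)
--         if cat == 'phone':
--             while len(run) >= 3:
--                 run[0]['field_category'] = 'phone1'
--                 run[1]['field_category'] = 'phone2'
--                 run[2]['field_category'] = 'phone3'
--                 run = run[3:]
--         elif cat == 'zipcode':
--             while len(run) >= 2:
--                 run[0]['field_category'] = 'zipcode1'
--                 run[1]['field_category'] = 'zipcode2'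
--                 run = run[2:]
--     return fields
-- ===== Notes on version B (the rewrite author's own statement) =====
-- stated objective: alternative
-- what changed: Replaces the two overlapping sliding-window index loops (whose re-reads of just-renamed cells implement the greedy grouping implicitly) with a groupby pass over maximal equal-category runs that renames floor(L/3) triples / floor(L/2) pairs per run directly.
import Mathlib
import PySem

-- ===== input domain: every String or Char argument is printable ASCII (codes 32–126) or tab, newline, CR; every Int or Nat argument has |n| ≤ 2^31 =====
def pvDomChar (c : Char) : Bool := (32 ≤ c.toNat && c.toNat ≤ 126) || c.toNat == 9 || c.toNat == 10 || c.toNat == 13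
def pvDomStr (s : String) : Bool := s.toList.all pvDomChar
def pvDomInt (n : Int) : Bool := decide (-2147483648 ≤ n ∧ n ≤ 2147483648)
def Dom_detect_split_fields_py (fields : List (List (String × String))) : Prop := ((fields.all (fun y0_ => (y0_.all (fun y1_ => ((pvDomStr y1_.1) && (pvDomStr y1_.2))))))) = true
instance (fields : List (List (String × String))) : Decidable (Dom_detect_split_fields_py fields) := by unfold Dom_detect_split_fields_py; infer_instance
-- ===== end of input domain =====

-- B replaces A's two overlapping sliding-window index loops by a group-into-runs pass
-- (same return value; both Pythons mutate the field dicts in place — the ports model the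
-- returned list of dicts).

-- shared accessors for the Python dicts: f.get('field_category') and f['field_category'] = v
def catOf (f : List (String × String)) : Option String :=
  (PySem.Dict.mk f).get? "field_category"

def setCat (f : List (String × String)) (v : String) : List (String × String) :=
  ((PySem.Dict.mk f).insert "field_category" v).items

-- ===== PORT A =====
-- one iteration of A's first loop body (window of 3 at index i)
def aStepPhone (acc : List (List (String × String))) (i : Nat) : List (List (String × String)) :=
  if catOf (acc.getD i []) = some "phone" ∧ catOf (acc.getD (i+1) []) = some "phone" ∧
      catOf (acc.getD (i+2) []) = some "phone" then
    ((acc.set i (setCat (acc.getD i []) "phone1")).set (i+1)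
        (setCat (acc.getD (i+1) []) "phone2")).set (i+2) (setCat (acc.getD (i+2) []) "phone3")
  else acc

-- one iteration of A's second loop body (window of 2 at index i)
def aStepZip (acc : List (List (String × String))) (i : Nat) : List (List (String × String)) :=
  if catOf (acc.getD i []) = some "zipcode" ∧ catOf (acc.getD (i+1) []) = some "zipcode" then
    (acc.set i (setCat (acc.getD i []) "zipcode1")).set (i+1)
        (setCat (acc.getD (i+1) []) "zipcode2")
  else acc

def detect_split_fields_py (fields : List (List (String × String))) : List (List (String × String)) :=
  let fs1 := (List.range (fields.length - 2)).foldl aStepPhone fields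
  (List.range (fs1.length - 1)).foldl aStepZip fs1

-- ===== PORT B =====
-- maximal runs of equal field_category (itertools.groupby)
def runsBy (l : List (List (String × String))) : List (List (List (String × String))) :=
  match l with
  | [] => []
  | f :: rest =>
      (f :: rest.takeWhile (fun g => catOf g == catOf f)) ::
        runsBy (rest.dropWhile (fun g => catOf g == catOf f))
termination_by l.length
decreasing_by
  exact Nat.lt_succ_of_le (List.length_dropWhile_le _ _)

-- 'while len(run) >= 3: rename first three; run = run[3:]'
def phoneFix : List (List (String × String)) → List (List (String × String))
  | a :: b :: c :: rest =>
      setCat a "phone1" :: setCat b "phone2" :: setCat c "phone3" :: phoneFix rest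
  | l => l

-- 'while len(run) >= 2: rename first two; run = run[2:]'
def zipFix : List (List (String × String)) → List (List (String × String))
  | a :: b :: rest => setCat a "zipcode1" :: setCat b "zipcode2" :: zipFix rest
  | l => l

-- the body of B's loop for one run (the group key is the run head's category)
def procRun (run : List (List (String × String))) : List (List (String × String)) :=
  match run with
  | [] => []
  | f :: _ =>
      if catOf f = some "phone" then phoneFix run
      else if catOf f = some "zipcode" then zipFix run
      else run

def detect_split_fields_py_alt (fields : List (List (String × String))) :
    List (List (String × String)) :=
  ((runsBy fields).map procRun).flatten

-- ===== PRECONDITION & SPEC =====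
def Spec_detect_split_fields_py (fields : List (List (String × String))) (out : List (List (String × String))) : Prop := out = detect_split_fields_py_alt fields
instance (fields : List (List (String × String))) (out : List (List (String × String))) : Decidable (Spec_detect_split_fields_py fields out) := by unfold Spec_detect_split_fields_py; infer_instance

-- ===== CLAIM (what is proved, stated in full; the proofs are below) =====
def Claim_equal_detect_split_fields_py : Prop := ∀ (fields : List (List (String × String))), Dom_detect_split_fields_py fields → Spec_detect_split_fields_py fields (detect_split_fields_py fields)

-- ===== LEMMAS AND PROOFS =====

def phoneGo : List (List (String × String)) → List (List (String × String))
  | a :: b :: c :: rest =>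
      if catOf a = some "phone" ∧ catOf b = some "phone" ∧ catOf c = some "phone" then
        setCat a "phone1" :: setCat b "phone2" :: setCat c "phone3" :: phoneGo rest
      else a :: phoneGo (b :: c :: rest)
  | l => l
termination_by l => l.length

def zipGo : List (List (String × String)) → List (List (String × String))
  | a :: b :: rest =>
      if catOf a = some "zipcode" ∧ catOf b = some "zipcode" then
        setCat a "zipcode1" :: setCat b "zipcode2" :: zipGo rest
      else a :: zipGo (b :: rest)
  | l => l
termination_by l => l.length

theorem catOf_setCat (f : List (String × String)) (v : String) :
    catOf (setCat f v) = some v := PySem.Dict.get?_insert_self (PySem.Dict.mk f) "field_category" v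

theorem getD_at_len (p : List (List (String × String))) (x : List (String × String))
    (t : List (List (String × String))) : (p ++ x :: t).getD p.length [] = x := by
  induction p with
  | nil => rfl
  | cons a p ih => simp [ih]

theorem getD_at_len1 (p : List (List (String × String))) (a b : List (String × String))
    (t : List (List (String × String))) : (p ++ a :: b :: t).getD (p.length + 1) [] = b := by
  induction p with
  | nil => rfl
  | cons x p ih => simp [ih]

theorem getD_at_len2 (p : List (List (String × String))) (a b c : List (String × String))
    (t : List (List (String × String))) : (p ++ a :: b :: c :: t).getD (p.length + 2) [] = c := by
  induction p with
  | nil => rfl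
  | cons x p ih => simp [ih]

theorem set3_at_len (p : List (List (String × String))) (a b c a' b' c' : List (String × String))
    (t : List (List (String × String))) :
    (((p ++ a :: b :: c :: t).set p.length a').set (p.length + 1) b').set (p.length + 2) c'
      = p ++ a' :: b' :: c' :: t := by
  induction p with
  | nil => rfl
  | cons x p ih => simp [List.set, ih]

theorem set2_at_len (p : List (List (String × String))) (a b a' b' : List (String × String))
    (t : List (List (String × String))) :
    ((p ++ a :: b :: t).set p.length a').set (p.length + 1) b' = p ++ a' :: b' :: t := by
  induction p with
  | nil => rfl
  | cons x p ih => simp [List.set, ih]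

theorem phone_fold (fs p : List (List (String × String))) :
    (List.range' p.length (fs.length - 2)).foldl aStepPhone (p ++ fs) = p ++ phoneGo fs := by
  induction fs using phoneGo.induct generalizing p with
  | case1 a b c rest h ih =>
      have hlen : (a :: b :: c :: rest).length - 2 = rest.length + 1 := by simp
      rw [hlen, List.range'_succ]
      simp only [List.foldl_cons]
      rw [show aStepPhone (p ++ a :: b :: c :: rest) p.length
            = p ++ setCat a "phone1" :: setCat b "phone2" :: setCat c "phone3" :: rest by
        simp only [aStepPhone, getD_at_len, getD_at_len1, getD_at_len2]
        rw [if_pos h, set3_at_len]]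
      rw [phoneGo]
      rw [if_pos h]
      match rest with
      | [] => simp [phoneGo]
      | [r0] =>
          simp only [List.length_cons, List.length_nil, List.range'_succ, List.range']
          simp only [List.foldl_cons, List.foldl_nil]
          rw [show aStepPhone (p ++ setCat a "phone1" :: setCat b "phone2" :: setCat c "phone3" :: [r0]) (p.length + 1) = _ from rfl]
          simp only [aStepPhone, getD_at_len1, catOf_setCat]
          rw [if_neg (by simp)]
          simp [phoneGo]

      | r0 :: r1 :: rest' =>
          have h2 : (r0 :: r1 :: rest').length = rest'.length + 2 := by simp
          rw [h2, List.range'_succ, List.range'_succ]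
          simp only [List.foldl_cons]
          rw [show aStepPhone (p ++ setCat a "phone1" :: setCat b "phone2" :: setCat c "phone3" :: r0 :: r1 :: rest') (p.length + 1) = p ++ setCat a "phone1" :: setCat b "phone2" :: setCat c "phone3" :: r0 :: r1 :: rest' by
            simp only [aStepPhone, getD_at_len1, catOf_setCat]
            rw [if_neg (by simp)]]
          rw [show aStepPhone (p ++ setCat a "phone1" :: setCat b "phone2" :: setCat c "phone3" :: r0 :: r1 :: rest') (p.length + 2) = p ++ setCat a "phone1" :: setCat b "phone2" :: setCat c "phone3" :: r0 :: r1 :: rest' by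
            simp only [aStepPhone, getD_at_len2, catOf_setCat]
            rw [if_neg (by simp)]]
          have := ih (p := p ++ [setCat a "phone1", setCat b "phone2", setCat c "phone3"])
          simp only [List.length_append, List.length_cons, List.length_nil, List.append_assoc,
            List.cons_append, List.nil_append] at this ⊢
          exact this
  | case2 a b c rest h ih =>
      have hlen : (a :: b :: c :: rest).length - 2 = rest.length + 1 := by simp
      rw [hlen, List.range'_succ]
      simp only [List.foldl_cons]
      rw [show aStepPhone (p ++ a :: b :: c :: rest) p.length = p ++ a :: b :: c :: rest by
        simp only [aStepPhone, getD_at_len, getD_at_len1, getD_at_len2]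
        rw [if_neg h]]
      rw [phoneGo, if_neg h]
      have := ih (p := p ++ [a])
      simp only [List.length_append, List.length_cons, List.length_nil, List.append_assoc,
        List.cons_append, List.nil_append] at this ⊢
      exact this
  | case3 l h =>
      rcases l with _ | ⟨a, _ | ⟨b, _ | ⟨c, rest⟩⟩⟩
      · simp [phoneGo]
      · simp [phoneGo]
      · simp [phoneGo]
      · exact (h a b c rest rfl).elim

theorem zip_fold (fs p : List (List (String × String))) :
    (List.range' p.length (fs.length - 1)).foldl aStepZip (p ++ fs) = p ++ zipGo fs := by
  induction fs using zipGo.induct generalizing p with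
  | case1 a b rest h ih =>
      have hlen : (a :: b :: rest).length - 1 = rest.length + 1 := by simp
      rw [hlen, List.range'_succ]
      simp only [List.foldl_cons]
      rw [show aStepZip (p ++ a :: b :: rest) p.length
            = p ++ setCat a "zipcode1" :: setCat b "zipcode2" :: rest by
        simp only [aStepZip, getD_at_len, getD_at_len1]
        rw [if_pos h, set2_at_len]]
      rw [zipGo, if_pos h]
      match rest with
      | [] => simp [zipGo]
      | r0 :: rest' =>
          have h2 : (r0 :: rest').length = rest'.length + 1 := by simp
          rw [h2, List.range'_succ]
          simp only [List.foldl_cons]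
          rw [show aStepZip (p ++ setCat a "zipcode1" :: setCat b "zipcode2" :: r0 :: rest') (p.length + 1)
                = p ++ setCat a "zipcode1" :: setCat b "zipcode2" :: r0 :: rest' by
            simp only [aStepZip, getD_at_len1, catOf_setCat]
            rw [if_neg (by simp)]]
          have := ih (p := p ++ [setCat a "zipcode1", setCat b "zipcode2"])
          simp only [List.length_append, List.length_cons, List.length_nil, List.append_assoc,
            List.cons_append, List.nil_append] at this ⊢
          exact this
  | case2 a b rest h ih =>
      have hlen : (a :: b :: rest).length - 1 = rest.length + 1 := by simp
      rw [hlen, List.range'_succ]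
      simp only [List.foldl_cons]
      rw [show aStepZip (p ++ a :: b :: rest) p.length = p ++ a :: b :: rest by
        simp only [aStepZip, getD_at_len, getD_at_len1]
        rw [if_neg h]]
      rw [zipGo, if_neg h]
      have := ih (p := p ++ [a])
      simp only [List.length_append, List.length_cons, List.length_nil, List.append_assoc,
        List.cons_append, List.nil_append] at this ⊢
      exact this
  | case3 l h =>
      rcases l with _ | ⟨a, _ | ⟨b, rest⟩⟩
      · simp [zipGo]
      · simp [zipGo]
      · exact (h a b rest rfl).elim

theorem phoneGo_cons_not (x : List (String × String)) (l : List (List (String × String)))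
    (hx : catOf x ≠ some "phone") : phoneGo (x :: l) = x :: phoneGo l := by
  match l with
  | [] => simp [phoneGo]
  | [u] => simp [phoneGo]
  | u :: v :: w => rw [phoneGo, if_neg (by tauto)]

theorem zipGo_cons_not (x : List (String × String)) (l : List (List (String × String)))
    (hx : catOf x ≠ some "zipcode") : zipGo (x :: l) = x :: zipGo l := by
  match l with
  | [] => simp [zipGo]
  | u :: w => rw [zipGo, if_neg (by tauto)]

theorem phoneGo_all_not (run t : List (List (String × String)))
    (h : ∀ x ∈ run, catOf x ≠ some "phone") :
    phoneGo (run ++ t) = run ++ phoneGo t := by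
  induction run with
  | nil => rfl
  | cons x r ih =>
      rw [List.cons_append, phoneGo_cons_not x _ (h x (by simp)),
        ih (fun y hy => h y (by simp [hy]))]
      rfl

theorem zipGo_all_not (run t : List (List (String × String)))
    (h : ∀ x ∈ run, catOf x ≠ some "zipcode") :
    zipGo (run ++ t) = run ++ zipGo t := by
  induction run with
  | nil => rfl
  | cons x r ih =>
      rw [List.cons_append, zipGo_cons_not x _ (h x (by simp)),
        ih (fun y hy => h y (by simp [hy]))]
      rfl

theorem phoneGo_run (run t : List (List (String × String)))
    (h : ∀ x ∈ run, catOf x = some "phone")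
    (ht : ∀ y, t.head? = some y → catOf y ≠ some "phone") :
    phoneGo (run ++ t) = phoneFix run ++ phoneGo t := by
  induction run using phoneFix.induct with
  | case1 a b c rest ih =>
      rw [show (a :: b :: c :: rest) ++ t = a :: b :: c :: (rest ++ t) by simp, phoneGo,
        if_pos ⟨h a (by simp), h b (by simp), h c (by simp)⟩,
        ih (fun x hx => h x (by simp [hx]))]
      rfl
  | case2 run hne =>
      rcases run with _ | ⟨a, _ | ⟨b, r⟩⟩
      · rfl
      · -- run = [a]
        rcases t with _ | ⟨u, t'⟩
        · simp [phoneGo, phoneFix]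
        · have hu : catOf u ≠ some "phone" := ht u rfl
          rcases t' with _ | ⟨v, t''⟩
          · simp [phoneGo, phoneFix]
          · rw [show [a] ++ u :: v :: t'' = a :: u :: v :: t'' by rfl, phoneGo,
              if_neg (by tauto)]
            rfl
      · -- run = [a, b] (longer excluded by hne)
        rcases r with _ | ⟨c, r'⟩
        · rcases t with _ | ⟨u, t'⟩
          · simp [phoneGo, phoneFix]
          · have hu : catOf u ≠ some "phone" := ht u rfl
            rw [show [a, b] ++ u :: t' = a :: b :: u :: t' by rfl, phoneGo,
              if_neg (by tauto)]
            rcases t' with _ | ⟨v, t''⟩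
            · simp [phoneGo, phoneFix]
            · rw [show (b :: u :: v :: t'' : List (List (String × String))) = b :: u :: v :: t'' by rfl,
                phoneGo, if_neg (by tauto)]
              simp [phoneFix]
        · exact (hne a b c r' rfl).elim

theorem zipGo_run (run t : List (List (String × String)))
    (h : ∀ x ∈ run, catOf x = some "zipcode")
    (ht : ∀ y, t.head? = some y → catOf y ≠ some "zipcode") :
    zipGo (run ++ t) = zipFix run ++ zipGo t := by
  induction run using zipFix.induct with
  | case1 a b rest ih =>
      rw [show (a :: b :: rest) ++ t = a :: b :: (rest ++ t) by simp, zipGo,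
        if_pos ⟨h a (by simp), h b (by simp)⟩, ih (fun x hx => h x (by simp [hx]))]
      rfl
  | case2 run hne =>
      rcases run with _ | ⟨a, _ | ⟨b, r⟩⟩
      · rfl
      · rcases t with _ | ⟨u, t'⟩
        · simp [zipGo, zipFix]
        · have hu : catOf u ≠ some "zipcode" := ht u rfl
          rw [show [a] ++ u :: t' = a :: u :: t' by rfl, zipGo, if_neg (by tauto)]
          simp [zipFix]
      · exact (hne a b r rfl).elim

theorem phoneFix_not_zip (run : List (List (String × String)))
    (h : ∀ x ∈ run, catOf x = some "phone") :
    ∀ y ∈ phoneFix run, catOf y ≠ some "zipcode" := by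
  induction run using phoneFix.induct with
  | case1 a b c rest ih =>
      intro y hy
      rw [phoneFix] at hy
      simp only [List.mem_cons] at hy
      rcases hy with rfl | rfl | rfl | hy
      · simp [catOf_setCat]
      · simp [catOf_setCat]
      · simp [catOf_setCat]
      · exact ih (fun x hx => h x (by simp [hx])) y hy
  | case2 run hne =>
      intro y hy
      have : catOf y = some "phone" := by
        apply h
        rcases run with _ | ⟨a, _ | ⟨b, r⟩⟩ <;> simpa [phoneFix] using hy
      simp [this]

theorem phoneGo_head (x : List (String × String)) (t : List (List (String × String))) :
    (∃ t', phoneGo (x :: t) = x :: t') ∨ (∃ t', phoneGo (x :: t) = setCat x "phone1" :: t') := by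
  match t with
  | [] => exact .inl ⟨[], by simp [phoneGo]⟩
  | [u] => exact .inl ⟨[u], by simp [phoneGo]⟩
  | u :: v :: w =>
      by_cases hc : catOf x = some "phone" ∧ catOf u = some "phone" ∧ catOf v = some "phone"
      · exact .inr ⟨_, by rw [phoneGo, if_pos hc]⟩
      · exact .inl ⟨_, by rw [phoneGo, if_neg hc]⟩

theorem dropWhile_head_false {α : Type} (p : α → Bool) (l : List α) (x : α) (xs : List α)
    (h : l.dropWhile p = x :: xs) : p x = false := by
  induction l with
  | nil => simp at h
  | cons a t ih =>
      rw [List.dropWhile_cons] at h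
      by_cases ha : p a = true
      · rw [if_pos ha] at h; exact ih h
      · rw [if_neg ha] at h
        obtain ⟨rfl, -⟩ := List.cons.inj h
        simpa using ha

theorem main_runs (l : List (List (String × String))) :
    zipGo (phoneGo l) = ((runsBy l).map procRun).flatten := by
  induction l using runsBy.induct with
  | case1 => simp [phoneGo, zipGo, runsBy]
  | case2 f rest ih =>
      set q : List (String × String) → Bool := fun g => catOf g == catOf f with hq
      set r := rest.takeWhile q with hr
      set rest' := rest.dropWhile q with hrest'
      have hruncat : ∀ x ∈ f :: r, catOf x = catOf f := by
        intro x hx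
        rcases List.mem_cons.mp hx with rfl | hx
        · rfl
        · have := List.mem_takeWhile_imp hx
          simpa [hq] using this
      have hhead : ∀ y, rest'.head? = some y → catOf y ≠ catOf f := by
        intro y hy
        obtain ⟨zs, hzz⟩ := List.head?_eq_some_iff.mp hy
        have := dropWhile_head_false q rest y zs (by rw [← hrest', hzz])
        simpa [hq] using this
      have hflat : ((runsBy (f :: rest)).map procRun).flatten
          = procRun (f :: r) ++ ((runsBy rest').map procRun).flatten := by
        rw [runsBy]
        simp only [List.map_cons, List.flatten_cons, ← hq, ← hr, ← hrest']
      have hrw : f :: rest = (f :: r) ++ rest' := by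
        simpa [hr, hrest'] using (List.takeWhile_append_dropWhile (p := q) (l := rest)).symm
      rw [hflat, ← ih, hrw]
      by_cases hphone : catOf f = some "phone"
      · rw [phoneGo_run (f :: r) rest'
            (fun x hx => (hruncat x hx).trans hphone)
            (fun y hy hc => hhead y hy (hc.trans hphone.symm))]
        rw [zipGo_all_not _ _ (phoneFix_not_zip (f :: r) (fun x hx => (hruncat x hx).trans hphone))]
        congr 1
        rw [procRun, if_pos hphone]
      · by_cases hzip : catOf f = some "zipcode"
        · rw [phoneGo_all_not (f :: r) _
            (fun x hx hc => hphone (((hruncat x hx).symm.trans hc)))]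
          have hzhead : ∀ y, (phoneGo rest').head? = some y → catOf y ≠ some "zipcode" := by
            intro y hy
            rcases he : rest' with _ | ⟨z, zs⟩
            · rw [he] at hy; simp [phoneGo] at hy
            · rw [he] at hy
              rcases phoneGo_head z zs with ⟨t', ht'⟩ | ⟨t', ht'⟩
              · rw [ht'] at hy
                simp only [List.head?_cons, Option.some.injEq] at hy
                subst hy
                exact fun hc => hhead z (by rw [he]; rfl) (hc.trans hzip.symm)
              · rw [ht'] at hy
                simp only [List.head?_cons, Option.some.injEq] at hy
                subst hy
                simp [catOf_setCat]
          rw [zipGo_run (f :: r) _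
            (fun x hx => (hruncat x hx).trans hzip) hzhead]
          congr 1
          rw [procRun, if_neg hphone, if_pos hzip]
        · rw [phoneGo_all_not (f :: r) _
            (fun x hx hc => hphone ((hruncat x hx).symm.trans hc))]
          rw [zipGo_all_not (f :: r) _
            (fun x hx hc => hzip ((hruncat x hx).symm.trans hc))]
          congr 1
          rw [procRun, if_neg hphone, if_neg hzip]


theorem detect_split_fields_py_eq_alt (fields : List (List (String × String))) :
    detect_split_fields_py fields = detect_split_fields_py_alt fields := by
  have h1 := phone_fold fields []
  have h2 := zip_fold (phoneGo fields) []
  simp only [List.nil_append, List.length_nil] at h1 h2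
  simp only [detect_split_fields_py, detect_split_fields_py_alt, List.range_eq_range']
  rw [h1, h2]
  exact main_runs fields

-- ===== VERDICT (by name: the statement is the Claim_ definition above) =====
theorem detect_split_fields_py_spec : Claim_equal_detect_split_fields_py := by
  intro fields _
  exact detect_split_fields_py_eq_alt fields
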